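-- pv_equiv track=rewrite | github.com/cherry-wb/webutil | css_minifica.py | wrap_css_lines
-- ===== SOURCE A (Python) =====
-- def wrap_css_lines(css, line_length):
--     """Wrap the lines of the given CSS to an approximate length."""
--     lines, line_start = [], 0
--     for i, char in enumerate(css):
--         if char == '}' and (i - line_start >= line_length):
--             lines.append(css[line_start:i + 1])
--             line_start = i + 1
--     if line_start < len(css):
--         lines.append(css[line_start:])
--     return '\n'.join(lines)
-- ===== SOURCE B (Python) =====
-- def wrap_css_lines(css, line_length):
--     """Wrap the lines of the given CSS to an approximate length."""
--     parts = css.split('}')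
--     lines, buf = [], ''
--     for part in parts[:-1]:
--         buf += part + '}'
--         if len(buf) - 1 >= line_length:
--             lines.append(buf)
--             buf = ''
--     buf += parts[-1]
--     if buf:
--         lines.append(buf)
--     return '\n'.join(lines)
-- ===== Notes on version B (the rewrite author's own statement) =====
-- stated objective: faster
-- what changed: B replaces A's indexed character-by-character scan (tracking line_start and slicing css) by splitting css once on '}' and folding over the resulting chunks with a string buffer, flushing the buffer when it passes the length threshold.
import Mathlib
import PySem

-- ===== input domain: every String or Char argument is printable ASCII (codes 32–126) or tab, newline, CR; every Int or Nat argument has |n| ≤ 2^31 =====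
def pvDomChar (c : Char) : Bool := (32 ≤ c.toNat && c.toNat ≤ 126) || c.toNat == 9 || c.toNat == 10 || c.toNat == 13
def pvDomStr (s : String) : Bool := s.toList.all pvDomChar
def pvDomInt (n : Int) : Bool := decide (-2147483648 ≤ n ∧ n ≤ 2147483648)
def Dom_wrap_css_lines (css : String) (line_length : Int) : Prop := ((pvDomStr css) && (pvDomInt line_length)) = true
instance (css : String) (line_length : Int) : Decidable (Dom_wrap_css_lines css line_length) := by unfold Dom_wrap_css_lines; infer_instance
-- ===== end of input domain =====

-- B re-decomposes A's character-by-character indexed scan into a single pass over the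
-- '}'-delimited chunks of css.split('}') (objective: faster by a constant factor — one pass over chunks instead of one per character).

-- ===== PORT A =====
-- loop body of A's "for i, char in enumerate(css)" (state = (lines, line_start))
def pvStepA (full : List Char) (line_length : Int)
    (st : List (List Char) × Int) (ic : Int × Char) : List (List Char) × Int :=
  if ic.2 = '}' ∧ ic.1 - st.2 ≥ line_length then
    (st.1 ++ [PySem.List.slice full (some st.2) (some (ic.1 + 1))], ic.1 + 1)
  else st

def wrap_css_lines (css : String) (line_length : Int) : String :=
  let cs := css.toList
  let r := (PySem.List.enumerate cs).foldl (pvStepA cs line_length) ([], 0)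
  let lines := if r.2 < (cs.length : Int) then r.1 ++ [PySem.List.slice cs (some r.2) none] else r.1
  String.ofList (PySem.Chars.join ['\n'] lines)

-- ===== PORT B =====
-- loop body of B's "for part in parts[:-1]" (state = (lines, buf))
def pvStepB (line_length : Int)
    (st : List (List Char) × List Char) (part : List Char) : List (List Char) × List Char :=
  let buf' := st.2 ++ part ++ ['}']
  if (buf'.length : Int) - 1 ≥ line_length then (st.1 ++ [buf'], []) else (st.1, buf')

def wrap_css_lines_alt (css : String) (line_length : Int) : String :=
  let parts := PySem.Chars.splitOn css.toList ['}']
  let r := (PySem.List.slice parts none (some (-1))).foldl (pvStepB line_length) ([], [])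
  let buf := r.2 ++ PySem.List.pyGetD parts (-1) []
  let lines := if buf ≠ [] then r.1 ++ [buf] else r.1
  String.ofList (PySem.Chars.join ['\n'] lines)

-- ===== PRECONDITION & SPEC =====
def Spec_wrap_css_lines (css : String) (line_length : Int) (out : String) : Prop := out = wrap_css_lines_alt css line_length
instance (css : String) (line_length : Int) (out : String) : Decidable (Spec_wrap_css_lines css line_length out) := by unfold Spec_wrap_css_lines; infer_instance

-- ===== CLAIM (what is proved, stated in full; the proofs are below) =====
def Claim_equal_wrap_css_lines : Prop := ∀ (css : String) (line_length : Int), Dom_wrap_css_lines css line_length → Spec_wrap_css_lines css line_length (wrap_css_lines css line_length)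

-- ===== LEMMAS AND PROOFS =====

-- the common greedy-wrap recursion both loops compute (pend = chars since the last cut)
def pvAux (L : Int) : List Char → List Char → List (List Char)
  | [], pend => if pend = [] then [] else [pend]
  | c :: cs, pend =>
    if c = '}' ∧ (pend.length : Int) ≥ L then (pend ++ [c]) :: pvAux L cs []
    else pvAux L cs (pend ++ [c])

-- split on a single '}' as a plain structural recursion (head accumulator pre)
def pvSplit : List Char → List Char → List (List Char)
  | pre, [] => [pre]
  | pre, c :: cs => if c = '}' then pre :: pvSplit [] cs else pvSplit (pre ++ [c]) cs

-- B's chunk recursion (last chunk has no '}')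
def pvAuxB (L : Int) : List (List Char) → List Char → List (List Char)
  | [], buf => if buf = [] then [] else [buf]
  | [p], buf => if buf ++ p = [] then [] else [buf ++ p]
  | p :: q :: ps, buf =>
    let buf' := buf ++ p ++ ['}']
    if (buf'.length : Int) - 1 ≥ L then buf' :: pvAuxB L (q :: ps) []
    else pvAuxB L (q :: ps) buf'

lemma pvSplit_ne_nil (pre cs : List Char) : pvSplit pre cs ≠ [] := by
  induction cs generalizing pre with
  | nil => simp [pvSplit]
  | cons c cs ih => simp only [pvSplit]; split <;> simp [ih]

lemma pvSplitOn_go_eq :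
    ∀ (fuel : Nat) (l cur : List Char) (acc : List (List Char)), l.length < fuel →
      PySem.Chars.splitOn.go ['}'] fuel l cur acc = acc.reverse ++ pvSplit cur.reverse l := by
  intro fuel
  induction fuel with
  | zero => intro l cur acc h; omega
  | succ fuel ih =>
    intro l cur acc h
    match l with
    | [] => simp [PySem.Chars.splitOn.go, pvSplit]
    | c :: rest =>
      simp only [PySem.Chars.splitOn.go]
      by_cases hc : c = '}'
      · subst hc
        rw [if_pos (by simp [List.isPrefixOf])]
        have hd : List.drop (['}'] : List Char).length ('}' :: rest) = rest := by simp
        rw [hd, ih _ _ _ (show rest.length < fuel by simp at h; omega)]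
        simp [pvSplit]
      · rw [if_neg (by simp [List.isPrefixOf, Ne.symm hc])]
        rw [ih _ _ _ (show rest.length < fuel by simp at h; omega)]
        simp [pvSplit, hc]

lemma pvSplitOn_eq (cs : List Char) : PySem.Chars.splitOn cs ['}'] = pvSplit [] cs := by
  unfold PySem.Chars.splitOn
  rw [pvSplitOn_go_eq cs.length.succ cs [] [] (by omega)]
  simp

lemma pvAuxB_split (L : Int) :
    ∀ (cs p buf : List Char), pvAuxB L (pvSplit p cs) buf = pvAux L cs (buf ++ p) := by
  intro cs
  induction cs with
  | nil => intro p buf; simp [pvSplit, pvAuxB, pvAux]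
  | cons c cs ih =>
    intro p buf
    by_cases hc : c = '}'
    · subst hc
      rw [pvSplit, if_pos rfl]
      obtain ⟨q, ps, hqs⟩ : ∃ q ps, pvSplit ([] : List Char) cs = q :: ps :=
        List.exists_cons_of_ne_nil (pvSplit_ne_nil [] cs)
      rw [hqs, pvAuxB, pvAux]
      have hB : ∀ x, pvAuxB L (q :: ps) x = pvAux L cs x := by
        intro x
        have := ih [] x
        rw [hqs] at this
        simpa using this
      have hcond : ((buf ++ p ++ ['}']).length : Int) - 1 ≥ L ↔ (((buf ++ p).length : Int) ≥ L) := by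
        simp; omega
      by_cases hL : ((buf ++ p).length : Int) ≥ L
      · rw [if_pos (hcond.mpr hL), if_pos ⟨rfl, hL⟩, hB]
      · rw [if_neg (fun h => hL (hcond.mp h)), if_neg (fun h => hL h.2), hB]
    · rw [pvSplit, if_neg hc, ih, pvAux, if_neg (by simp [hc])]
      simp [List.append_assoc]

lemma pvFoldB (L : Int) :
    ∀ (ps : List (List Char)) (h : ps ≠ []) (lines : List (List Char)) (buf : List Char),
      (let r := ps.dropLast.foldl (pvStepB L) (lines, buf)
       let buf2 := r.2 ++ ps.getLast h
       if buf2 ≠ [] then r.1 ++ [buf2] else r.1)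
      = lines ++ pvAuxB L ps buf := by
  intro ps
  induction ps with
  | nil => intro h; exact absurd rfl h
  | cons p ps ih =>
    intro _ lines buf
    match ps with
    | [] =>
      by_cases hb : buf ++ p = [] <;> simp [pvAuxB, hb]
    | q :: ps' =>
      have hne : q :: ps' ≠ [] := by simp
      simp only [List.dropLast_cons_of_ne_nil hne, List.foldl_cons,
        List.getLast_cons hne, pvAuxB, pvStepB]
      by_cases hL : ((buf ++ p ++ ['}']).length : Int) - 1 ≥ L
      · rw [if_pos hL]
        simp only at hL ⊢
        rw [if_pos hL]
        have := ih hne (lines ++ [buf ++ p ++ ['}']]) []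
        simp only [List.append_assoc] at this ⊢
        rw [this]
        simp
      · rw [if_neg hL]
        simp only at hL ⊢
        rw [if_neg hL]
        have := ih hne lines (buf ++ p ++ ['}'])
        simp only [List.append_assoc] at this ⊢
        exact this

lemma pvFoldA (L : Int) :
    ∀ (cs pre pend : List Char) (lines : List (List Char)),
      (let full := pre ++ pend ++ cs
       let r := (PySem.List.enumerate cs ((pre.length + pend.length : Nat) : Int)).foldl
                  (pvStepA full L) (lines, (pre.length : Int))
       if r.2 < (full.length : Int) then r.1 ++ [PySem.List.slice full (some r.2) none] else r.1)
      = lines ++ pvAux L cs pend := by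
  intro cs
  induction cs with
  | nil =>
    intro pre pend lines
    simp only [PySem.List.enumerate, List.foldl_nil, List.append_nil]
    rw [PySem.List.slice_from_natCast, List.drop_left]
    by_cases hp : pend = []
    · subst hp; simp [pvAux]
    · have h1 : (pre.length : Int) < (((pre ++ pend).length : Nat) : Int) := by
        have : pend.length ≠ 0 := by simpa using hp
        simp only [List.length_append]; omega
      rw [if_pos h1]
      simp [pvAux, hp]
  | cons c cs ih =>
    intro pre pend lines
    rw [PySem.List.enumerate_cons]
    simp only [List.foldl_cons]
    by_cases hcond : c = '}' ∧ ((pre.length + pend.length : Nat) : Int) - (pre.length : Int) ≥ L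
    · have hc : c = '}' := hcond.1
      have hlen : ((pend.length : Int) ≥ L) := by
        have := hcond.2; push_cast at this ⊢; omega
      rw [show pvStepA (pre ++ pend ++ (c :: cs)) L (lines, (pre.length : Int))
            (((pre.length + pend.length : Nat) : Int), c)
          = (lines ++ [PySem.List.slice (pre ++ pend ++ (c :: cs)) (some (pre.length : Int))
              (some (((pre.length + pend.length : Nat) : Int) + 1))],
             ((pre.length + pend.length : Nat) : Int) + 1) from by
        simp only [pvStepA, if_pos hcond]]
      have hslice : PySem.List.slice (pre ++ pend ++ (c :: cs)) (some (pre.length : Int))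
          (some (((pre.length + pend.length : Nat) : Int) + 1)) = pend ++ [c] := by
        have h3 : (((pre.length + pend.length : Nat) : Int) + 1)
            = ((pre.length + pend.length + 1 : Nat) : Int) := by push_cast; ring
        rw [h3, PySem.List.slice_natCast]
        rw [List.append_assoc, List.drop_left]
        have h2 : pend ++ (c :: cs) = (pend ++ [c]) ++ cs := by simp
        rw [h2, List.take_left' (by simp; omega)]
      rw [hslice]
      have heq : ((pre.length + pend.length : Nat) : Int) + 1
          = (((pre ++ pend ++ [c]).length : Nat) : Int) := by simp; ring
      have harr : pre ++ pend ++ (c :: cs) = (pre ++ pend ++ [c]) ++ [] ++ cs := by simp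
      rw [heq, harr]
      have H := ih (pre ++ pend ++ [c]) [] (lines ++ [pend ++ [c]])
      have hr : pvAux L (c :: cs) pend = (pend ++ [c]) :: pvAux L cs [] := by
        rw [pvAux, if_pos ⟨hc, hlen⟩]
      rw [hr]
      exact H.trans (by simp)
    · rw [show pvStepA (pre ++ pend ++ (c :: cs)) L (lines, (pre.length : Int))
            (((pre.length + pend.length : Nat) : Int), c) = (lines, (pre.length : Int)) from by
        simp only [pvStepA, if_neg hcond]]
      have harr : pre ++ pend ++ (c :: cs) = pre ++ (pend ++ [c]) ++ cs := by simp
      have hstart : ((pre.length + pend.length : Nat) : Int) + 1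
          = ((pre.length + (pend ++ [c]).length : Nat) : Int) := by simp; ring
      rw [harr, hstart, ih pre (pend ++ [c]) lines]
      have hr2 : pvAux L (c :: cs) pend = pvAux L cs (pend ++ [c]) := by
        rw [pvAux, if_neg (fun h => hcond ⟨h.1, by have := h.2; push_cast; omega⟩)]
      rw [hr2]

-- ===== VERDICT (by name: the statement is the Claim_ definition above) =====
theorem wrap_css_lines_spec : Claim_equal_wrap_css_lines := by
  intro css L _
  unfold Spec_wrap_css_lines wrap_css_lines wrap_css_lines_alt
  dsimp only
  have hA := pvFoldA L css.toList [] [] []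
  simp only [List.nil_append, List.length_nil, Nat.cast_zero, Nat.add_zero] at hA
  have hne := pvSplit_ne_nil [] css.toList
  have hB := pvFoldB L (pvSplit [] css.toList) hne [] []
  simp only [List.nil_append] at hB
  rw [pvSplitOn_eq, PySem.List.slice_to_neg_one, PySem.List.pyGetD_neg_one _ _ hne]
  rw [hA, hB, pvAuxB_split]
  simp
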